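-- pv_equiv track=rewrite | github.com/BrunoV21/CodeTide | codetide/mcp/tools/patch_code/parser.py | find_context_core
-- ===== SOURCE A (Python) =====
-- from typing import Dict, List, Optional, Tuple, Union
--
-- def find_context_core(
--     lines: List[str], context: List[str], start: int
-- ) -> Tuple[int, int]:
--     """Core fuzzy matching logic."""
--     if not context:
--         return start, 0
--
--     # Exact match
--     for i in range(start, len(lines) - len(context) + 1):
--         if lines[i : i + len(context)] == context:
--             return i, 0
--
--     # Match ignoring trailing whitespace
--     norm_context = [s.rstrip() for s in context]
--     for i in range(start, len(lines) - len(context) + 1):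
--         if [s.rstrip() for s in lines[i : i + len(context)]] == norm_context:
--             return i, 1
--
--     # Match ignoring all leading/trailing whitespace
--     strip_context = [s.strip() for s in context]
--     for i in range(start, len(lines) - len(context) + 1):
--         if [s.strip() for s in lines[i : i + len(context)]] == strip_context:
--             return i, 100
--
--     return -1, 0
-- ===== SOURCE B (Python) =====
-- def find_context_core(lines, context, start):
--     """Single pass: precompute normalized line/context arrays once, record the
--     first match of each tolerance phase while scanning, return by phase priority."""
--     m = len(context)
--     if m == 0:
--         return start, 0
--     n = len(lines)
--     r_lines = [s.rstrip() for s in lines]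
--     s_lines = [s.strip() for s in lines]
--     r_ctx = [s.rstrip() for s in context]
--     s_ctx = [s.strip() for s in context]
--     first_r = None
--     first_s = None
--     for i in range(max(start, 0), n - m + 1):
--         if lines[i:i+m] == context:
--             return i, 0
--         if first_r is None and r_lines[i:i+m] == r_ctx:
--             first_r = i
--         if first_s is None and s_lines[i:i+m] == s_ctx:
--             first_s = i
--     if first_r is not None:
--         return first_r, 1
--     if first_s is not None:
--         return first_s, 100
--     return -1, 0
-- ===== Notes on version B (the rewrite author's own statement) =====
-- stated objective: alternative
-- what changed: B normalizes lines and context once up front and makes a single left-to-right pass recording the first match of each whitespace-tolerance phase, instead of A's three full rescans that re-strip every window slice.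
-- outside the precondition, e.g. on find_context_core(['a', 'b', 'c'], ['b'], -3): A returns (-2, 0), B returns (1, 0)
import Mathlib
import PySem

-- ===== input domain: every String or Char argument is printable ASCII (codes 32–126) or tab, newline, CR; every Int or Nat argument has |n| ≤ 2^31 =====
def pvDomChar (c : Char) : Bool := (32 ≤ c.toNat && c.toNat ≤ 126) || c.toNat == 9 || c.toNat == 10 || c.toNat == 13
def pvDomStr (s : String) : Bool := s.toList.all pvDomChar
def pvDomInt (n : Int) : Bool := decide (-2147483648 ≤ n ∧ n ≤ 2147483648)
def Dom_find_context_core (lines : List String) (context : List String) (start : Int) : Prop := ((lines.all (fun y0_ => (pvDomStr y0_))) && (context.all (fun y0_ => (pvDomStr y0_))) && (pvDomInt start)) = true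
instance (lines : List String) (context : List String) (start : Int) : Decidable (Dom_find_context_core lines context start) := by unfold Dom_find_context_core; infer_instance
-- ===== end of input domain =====

-- B precomputes normalized arrays once and finds all three phases in one pass; equivalence is on the return value only.

-- ===== PORT A =====
def find_context_core (lines : List String) (context : List String) (start : Int) : Int × Int :=
  if context = [] then (start, 0)
  else
    let n : Int := PySem.List.len lines
    let m : Int := PySem.List.len context
    -- Exact match
    match (PySem.List.pyRange start (n - m + 1) 1).find?
        (fun i => PySem.List.slice lines (some i) (some (i + m)) == context) with
    | some i => (i, 0)
    | none =>
      -- Match ignoring trailing whitespace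
      let norm_context := context.map PySem.Str.rstrip
      match (PySem.List.pyRange start (n - m + 1) 1).find?
          (fun i => (PySem.List.slice lines (some i) (some (i + m))).map PySem.Str.rstrip == norm_context) with
      | some i => (i, 1)
      | none =>
        -- Match ignoring all leading/trailing whitespace
        let strip_context := context.map PySem.Str.strip
        match (PySem.List.pyRange start (n - m + 1) 1).find?
            (fun i => (PySem.List.slice lines (some i) (some (i + m))).map PySem.Str.strip == strip_context) with
        | some i => (i, 100)
        | none => (-1, 0)

-- ===== PORT B =====
-- the single scan of Source B: early return on an exact match, remember the first
-- rstrip-match and the first strip-match, fall back by phase priority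
def altLoop (p0 p1 p2 : Int → Bool) : List Int → Option Int → Option Int → Int × Int
  | [], fr, fs =>
    match fr with
    | some j => (j, 1)
    | none =>
      match fs with
      | some j => (j, 100)
      | none => (-1, 0)
  | i :: t, fr, fs =>
    if p0 i then (i, 0)
    else
      altLoop p0 p1 p2 t
        (if fr = none ∧ p1 i then some i else fr)
        (if fs = none ∧ p2 i then some i else fs)

def find_context_core_alt (lines : List String) (context : List String) (start : Int) : Int × Int :=
  let m : Int := PySem.List.len context
  if m = 0 then (start, 0)
  else
    let n : Int := PySem.List.len lines
    let r_lines := lines.map PySem.Str.rstrip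
    let s_lines := lines.map PySem.Str.strip
    let r_ctx := context.map PySem.Str.rstrip
    let s_ctx := context.map PySem.Str.strip
    altLoop
      (fun i => PySem.List.slice lines (some i) (some (i + m)) == context)
      (fun i => PySem.List.slice r_lines (some i) (some (i + m)) == r_ctx)
      (fun i => PySem.List.slice s_lines (some i) (some (i + m)) == s_ctx)
      (PySem.List.pyRange (max start 0) (n - m + 1) 1) none none

-- ===== PRECONDITION & SPEC =====
-- Pre_ excludes negative start: there Python's slice lines[i:i+m] wraps the negative
-- index i around the end of lines, so A can report a "match" at a negative position —
-- an accidental corner no caller intends; B simply starts scanning at line 0.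
def Pre_find_context_core (_lines : List String) (_context : List String) (start : Int) : Prop := 0 ≤ start
instance (lines : List String) (context : List String) (start : Int) : Decidable (Pre_find_context_core lines context start) := by unfold Pre_find_context_core; infer_instance
def pvWitness_find_context_core : List String × List String × Int := (["a", "b "], ["b"], 0)
def Spec_find_context_core (lines : List String) (context : List String) (start : Int) (out : Int × Int) : Prop := out = find_context_core_alt lines context start
instance (lines : List String) (context : List String) (start : Int) (out : Int × Int) : Decidable (Spec_find_context_core lines context start out) := by unfold Spec_find_context_core; infer_instance

-- ===== CLAIM (what is proved, stated in full; the proofs are below) =====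
def Claim_equal_find_context_core : Prop := ∀ (lines : List String) (context : List String) (start : Int), Dom_find_context_core lines context start → Pre_find_context_core lines context start → Spec_find_context_core lines context start (find_context_core lines context start)

-- ===== LEMMAS AND PROOFS =====

-- Python list slicing commutes with an elementwise map
theorem slice_map {α β : Type} (f : α → β) (xs : List α) (a? b? : Option Int) :
    PySem.List.slice (xs.map f) a? b? = (PySem.List.slice xs a? b?).map f := by
  simp [PySem.List.slice, PySem.List.clampIdx]

-- B's single pass computes: first p0 hit, else the remembered-or-first p1 hit, else p2, else (-1,0)
theorem altLoop_spec (p0 p1 p2 : Int → Bool) (R : List Int) (fr fs : Option Int) :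
    altLoop p0 p1 p2 R fr fs =
      match R.find? p0 with
      | some i => (i, 0)
      | none =>
        match fr.orElse (fun _ => R.find? p1) with
        | some j => (j, 1)
        | none =>
          match fs.orElse (fun _ => R.find? p2) with
          | some j => (j, 100)
          | none => (-1, 0) := by
  induction R generalizing fr fs with
  | nil => simp [altLoop]
  | cons i t ih =>
    by_cases h0 : p0 i
    · simp [altLoop, h0, List.find?]
    · simp only [altLoop, h0, if_false, Bool.false_eq_true, ih]
      cases fr <;> cases fs <;> by_cases h1 : p1 i <;> by_cases h2 : p2 i <;>
        simp [h0, h1, h2, List.find?, Option.orElse]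

-- ===== VERDICT (by name: the statement is the Claim_ definition above) =====
theorem find_context_core_spec : Claim_equal_find_context_core := by
  intro lines context start _hdom hpre
  unfold Spec_find_context_core find_context_core find_context_core_alt
  have hs : (0:Int) ≤ start := hpre
  have hmax : max start 0 = start := by omega
  by_cases hc : context = []
  · simp [hc, PySem.List.len]
  · have hm : PySem.List.len context ≠ 0 := by
      simpa [PySem.List.len] using hc
    simp only [if_neg hc, if_neg hm, hmax, altLoop_spec]
    simp only [slice_map]
    rfl
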